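-- pv_equiv track=rewrite | github.com/privel/se-toolkit-lab-7 | bot/handlers/keyboard.py | get_labs_keyboard
-- ===== SOURCE A (Python) =====
-- from typing import Any
--
-- def get_labs_keyboard(labs: list[dict]) -> list[list[dict[str, Any]]]:
--     """Get inline keyboard with lab buttons.
--
--     Args:
--         labs: List of lab items from backend
--
--     Returns:
--         Inline keyboard markup with lab buttons.
--     """
--     keyboard = []
--     row = []
--
--     for lab in labs[:10]:  # Limit to first 10 labs
--         slug = lab.get("slug", "")
--         if slug:
--             row.append({
--                 "text": slug,
--                 "callback_data": f"lab_{slug}",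
--             })
--             if len(row) >= 2:
--                 keyboard.append(row)
--                 row = []
--
--     if row:
--         keyboard.append(row)
--
--     return keyboard
-- ===== SOURCE B (Python) =====
-- def get_labs_keyboard(labs: list[dict]) -> list:
--     """Two-phase rewrite: filter the first 10 labs into a flat button list,
--     then chunk that list into rows of two."""
--     slugs = [lab.get("slug", "") for lab in labs[:10]]
--     buttons = [{"text": s, "callback_data": f"lab_{s}"} for s in slugs if s]
--     return _chunk2(buttons)
--
--
-- def _chunk2(xs: list) -> list:
--     if not xs:
--         return []
--     return [xs[:2]] + _chunk2(xs[2:])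
-- ===== Notes on version B (the rewrite author's own statement) =====
-- stated objective: alternative
-- what changed: A emits rows while scanning with a mutable row accumulator; B separates the work into two phases: a flat filtered button list built first, then chunked into rows of two by a recursive splitter.
import Mathlib
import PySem

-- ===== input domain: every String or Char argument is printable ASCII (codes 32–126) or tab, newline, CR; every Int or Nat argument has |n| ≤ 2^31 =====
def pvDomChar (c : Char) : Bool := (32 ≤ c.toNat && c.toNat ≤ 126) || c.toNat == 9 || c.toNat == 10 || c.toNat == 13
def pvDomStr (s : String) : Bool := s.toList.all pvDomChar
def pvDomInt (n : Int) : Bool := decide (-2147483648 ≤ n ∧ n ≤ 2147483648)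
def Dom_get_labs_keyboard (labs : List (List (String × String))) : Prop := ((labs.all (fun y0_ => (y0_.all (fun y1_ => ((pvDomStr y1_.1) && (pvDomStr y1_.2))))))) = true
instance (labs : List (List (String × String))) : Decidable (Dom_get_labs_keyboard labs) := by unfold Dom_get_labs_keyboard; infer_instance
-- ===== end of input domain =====

-- B rebuilds the same keyboard in two phases (filter to a flat button list, then chunk into pairs)
-- instead of A's single scan with a mutable row accumulator; same behaviour, proved equal below.

-- ===== PORT A =====
-- lab.get("slug", "") on an association list: first matching key, default "".
def pvGetSlug (lab : List (String × String)) : String :=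
  ((lab.find? (fun kv => kv.1 == "slug")).map Prod.snd).getD ""

def pvButton (slug : String) : List (String × String) :=
  [("text", slug), ("callback_data", "lab_" ++ slug)]

-- the for-loop body of A, over state (keyboard, row)
def pvStepA (st : List (List (List (String × String))) × List (List (String × String)))
    (lab : List (String × String)) :
    List (List (List (String × String))) × List (List (String × String)) :=
  let slug := pvGetSlug lab
  if slug ≠ "" then
    let row := st.2 ++ [pvButton slug]
    if row.length ≥ 2 then (st.1 ++ [row], []) else (st.1, row)
  else st

def get_labs_keyboard (labs : List (List (String × String))) : List (List (List (String × String))) :=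
  let st := (labs.take 10).foldl pvStepA ([], [])
  if st.2 ≠ [] then st.1 ++ [st.2] else st.1

-- ===== PORT B =====
-- _chunk2: rows of two, built recursively (xs[:2] and xs[2:])
def pvChunk2 {α : Type} : List α → List (List α)
  | [] => []
  | [a] => [[a]]
  | a :: b :: r => [a, b] :: pvChunk2 r

def get_labs_keyboard_alt (labs : List (List (String × String))) : List (List (List (String × String))) :=
  let slugs := (labs.take 10).map pvGetSlug
  let buttons := (slugs.filter (fun s => s ≠ "")).map pvButton
  pvChunk2 buttons

-- ===== PRECONDITION & SPEC =====
def Spec_get_labs_keyboard (labs : List (List (String × String))) (out : List (List (List (String × String)))) : Prop := out = get_labs_keyboard_alt labs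
instance (labs : List (List (String × String))) (out : List (List (List (String × String)))) : Decidable (Spec_get_labs_keyboard labs out) := by unfold Spec_get_labs_keyboard; infer_instance

-- ===== CLAIM (what is proved, stated in full; the proofs are below) =====
def Claim_equal_get_labs_keyboard : Prop := ∀ (labs : List (List (String × String))), Dom_get_labs_keyboard labs → Spec_get_labs_keyboard labs (get_labs_keyboard labs)

-- ===== LEMMAS AND PROOFS =====

-- finishing step of A: flush the pending row
def pvFinishA (st : List (List (List (String × String))) × List (List (String × String))) :
    List (List (List (String × String))) :=
  if st.2 ≠ [] then st.1 ++ [st.2] else st.1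

-- loop invariant: the pending row holds at most one button; A's flushed fold from
-- (kb, row) equals kb ++ the chunking of row followed by the remaining buttons.
theorem pvLoopA_eq (xs : List (List (String × String)))
    (kb : List (List (List (String × String)))) (row : List (List (String × String)))
    (hrow : row = [] ∨ ∃ b, row = [b]) :
    pvFinishA (xs.foldl pvStepA (kb, row)) =
      kb ++ pvChunk2 (row ++ ((xs.map pvGetSlug).filter (fun s => s ≠ "")).map pvButton) := by
  induction xs generalizing kb row with
  | nil =>
    rcases hrow with h | ⟨b, h⟩ <;> subst h <;> simp [pvFinishA, pvChunk2]
  | cons x xs ih =>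
    simp only [List.foldl_cons, List.map_cons, List.filter_cons]
    by_cases hx : pvGetSlug x ≠ ""
    · rcases hrow with h | ⟨b, h⟩ <;> subst h
      · rw [show pvStepA (kb, []) x = (kb, [pvButton (pvGetSlug x)]) by
          simp [pvStepA, hx]]
        rw [ih _ _ (Or.inr ⟨_, rfl⟩)]
        simp [hx]
      · rw [show pvStepA (kb, [b]) x = (kb ++ [[b, pvButton (pvGetSlug x)]], []) by
          simp [pvStepA, hx]]
        rw [ih _ _ (Or.inl rfl)]
        simp [hx, pvChunk2]
    · rw [show pvStepA (kb, row) x = (kb, row) by simp [pvStepA, hx]]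
      rw [ih _ _ hrow]
      simp at hx
      simp [hx]

-- ===== VERDICT (by name: the statement is the Claim_ definition above) =====
theorem get_labs_keyboard_spec : Claim_equal_get_labs_keyboard := by
  intro labs _
  show get_labs_keyboard labs = get_labs_keyboard_alt labs
  have h := pvLoopA_eq (labs.take 10) [] [] (Or.inl rfl)
  simpa [get_labs_keyboard, get_labs_keyboard_alt, pvFinishA] using h
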